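-- pv_equiv track=rewrite | github.com/zilun-zhang/project | src/utils5.py | distribute_nodes_across_layers
-- ===== SOURCE A (Python) =====
-- from typing import Dict, List, Tuple
--
-- def distribute_nodes_across_layers(N: int, L: int, max_width: int) -> List[int]:
--     """Heuristic split of N nodes into L layers with max layer width <= max_width.
--     Returns list of widths per layer with sum == N.
--     """
--     if L <= 0:
--         return [N]
--     widths = [0] * L
--     # Fill as evenly as possible, capped by max_width
--     i = 0
--     remaining = N
--     while remaining > 0:
--         if widths[i] < max_width:
--             widths[i] += 1
--             remaining -= 1
--         i = (i + 1) % L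
--     return widths
-- ===== SOURCE B (Python) =====
-- def distribute_nodes_across_layers(N, L, max_width):
--     if L <= 0:
--         return [N]
--     n = max(N, 0)
--     base, extra = divmod(n, L)
--     return [base + (1 if i < extra else 0) for i in range(L)]
-- ===== Notes on version B (the rewrite author's own statement) =====
-- stated objective: faster
-- what changed: Replaces the one-node-at-a-time round-robin while-loop with a closed-form even split (base = N//L, first N%L layers get one extra), computed in a single comprehension over the L layers.
import Mathlib
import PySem

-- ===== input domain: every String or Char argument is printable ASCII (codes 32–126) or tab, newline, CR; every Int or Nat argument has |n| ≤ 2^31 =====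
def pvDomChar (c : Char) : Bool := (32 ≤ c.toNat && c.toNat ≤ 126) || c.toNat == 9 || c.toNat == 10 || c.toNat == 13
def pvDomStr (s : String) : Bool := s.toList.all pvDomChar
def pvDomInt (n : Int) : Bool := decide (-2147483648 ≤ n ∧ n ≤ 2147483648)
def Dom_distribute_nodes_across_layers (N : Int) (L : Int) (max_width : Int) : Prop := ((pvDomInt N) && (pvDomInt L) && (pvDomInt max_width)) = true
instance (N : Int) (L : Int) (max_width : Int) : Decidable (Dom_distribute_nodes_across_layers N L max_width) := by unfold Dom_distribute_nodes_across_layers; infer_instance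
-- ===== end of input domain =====

-- B replaces A's one-node-at-a-time round-robin loop with a closed-form even split
-- (base = N//L, first N%L layers get one extra); objective: faster (O(L) vs O(N)).


-- ===== PORT A =====
-- A's while-loop, with a fuel guard to make it total: on every input admitted by
-- Pre_ the cap branch never skips, so the loop makes exactly max(N,0) decrements
-- and fuel N.toNat + 1 is enough; where Python would loop forever (outside Pre_)
-- the fuel runs out.
def pvLoopA (max_width L : Int) : Nat → List Int → Int → Int → List Int
  | 0, widths, _, _ => widths
  | fuel + 1, widths, i, remaining =>
    if remaining > 0 then
      let w := PySem.List.pyGetD widths i 0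
      if w < max_width then
        pvLoopA max_width L fuel (widths.set i.toNat (w + 1)) (PySem.Int.mod (i + 1) L) (remaining - 1)
      else
        pvLoopA max_width L fuel widths (PySem.Int.mod (i + 1) L) remaining
    else widths

def distribute_nodes_across_layers (N : Int) (L : Int) (max_width : Int) : List Int :=
  if L ≤ 0 then [N]
  else pvLoopA max_width L (N.toNat + 1) (List.replicate L.toNat 0) 0 N

-- ===== PORT B =====
def distribute_nodes_across_layers_alt (N : Int) (L : Int) (max_width : Int) : List Int :=
  if L ≤ 0 then [N]
  else
    let n := max N 0
    let base := PySem.Int.floordiv n L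
    let extra := PySem.Int.mod n L
    (PySem.List.pyRange 0 L).map (fun i => base + if i < extra then 1 else 0)

-- ===== PRECONDITION & SPEC =====
-- Pre_ excludes exactly the inputs on which Python A never returns (the while
-- loop diverges): L > 0 together with N > 0 and N > L * max_width.
def Pre_distribute_nodes_across_layers (N : Int) (L : Int) (max_width : Int) : Prop :=
  L ≤ 0 ∨ N ≤ 0 ∨ N ≤ L * max_width
instance (N : Int) (L : Int) (max_width : Int) : Decidable (Pre_distribute_nodes_across_layers N L max_width) := by unfold Pre_distribute_nodes_across_layers; infer_instance

def pvWitness_distribute_nodes_across_layers : Int × Int × Int := (7, 3, 5)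

def Spec_distribute_nodes_across_layers (N : Int) (L : Int) (max_width : Int) (out : List Int) : Prop := out = distribute_nodes_across_layers_alt N L max_width
instance (N : Int) (L : Int) (max_width : Int) (out : List Int) : Decidable (Spec_distribute_nodes_across_layers N L max_width out) := by unfold Spec_distribute_nodes_across_layers; infer_instance

-- ===== CLAIM (what is proved, stated in full; the proofs are below) =====
def Claim_equal_distribute_nodes_across_layers : Prop := ∀ (N : Int) (L : Int) (max_width : Int), Dom_distribute_nodes_across_layers N L max_width → Pre_distribute_nodes_across_layers N L max_width → Spec_distribute_nodes_across_layers N L max_width (distribute_nodes_across_layers N L max_width)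

-- ===== LEMMAS AND PROOFS =====

-- the even-split shape: first r layers hold q+1, the rest hold q
def natForm (L' q r : Nat) : List Int :=
  (List.range L').map (fun j => (q : Int) + if j < r then 1 else 0)

lemma natForm_getD (L' q r j : Nat) (hj : j < L') :
    PySem.List.pyGetD (natForm L' q r) (j : Int) 0 = (q : Int) + if j < r then 1 else 0 := by
  simp [natForm, PySem.List.pyGetD_natCast, List.getD, hj]

lemma natForm_set (L' q r : Nat) (_hr : r < L') :
    (natForm L' q r).set r ((q : Int) + 1) = natForm L' q (r + 1) := by
  apply List.ext_getElem
  · simp [natForm]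
  · intro j hj hj'
    simp only [natForm, List.length_map, List.length_range] at hj'
    simp only [natForm, List.getElem_set, List.getElem_map, List.getElem_range]
    split_ifs <;> omega

lemma natForm_full (L' q : Nat) : natForm L' q L' = natForm L' (q + 1) 0 := by
  unfold natForm
  apply List.map_congr_left
  intro j hj
  simp only [List.mem_range] at hj
  split_ifs <;> [push_cast; skip] <;> omega

lemma replicate_eq_natForm (L' : Nat) : List.replicate L' (0 : Int) = natForm L' 0 0 := by
  apply List.ext_getElem <;> simp [natForm]

lemma pyRange_map_natForm (L' q r : Nat) :
    (PySem.List.pyRange 0 (L' : Int)).map (fun i => (q : Int) + if i < (r : Int) then 1 else 0)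
      = natForm L' q r := by
  rw [PySem.List.pyRange_zero_natCast, natForm, List.map_map]
  apply List.map_congr_left
  intro j _
  simp [Nat.cast_lt]

-- the loop invariant: from the even state (q, r) with m nodes still to place,
-- the loop ends in the even state for the total q*L' + r + m
lemma pvLoopA_eq (W L' : Nat) (hL' : 0 < L') :
    ∀ m q r, r < L' → q * L' + r + m ≤ L' * W →
      pvLoopA (W : Int) (L' : Int) (m + 1) (natForm L' q r) (r : Int) (m : Int)
        = natForm L' ((q * L' + r + m) / L') ((q * L' + r + m) % L') := by
  intro m
  induction m with
  | zero =>
    intro q r hr _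
    rw [pvLoopA, if_neg (by simp)]
    have h1 : (q * L' + r + 0) / L' = q := by
      rw [Nat.add_zero, Nat.mul_comm, Nat.mul_add_div hL', Nat.div_eq_of_lt hr, Nat.add_zero]
    have h2 : (q * L' + r + 0) % L' = r := by
      rw [Nat.add_zero, Nat.mul_comm, Nat.mul_add_mod, Nat.mod_eq_of_lt hr]
    rw [h1, h2]
  | succ m ih =>
    intro q r hr hle
    have hqW : q < W := by
      have h2 : L' * q < L' * W := by
        calc L' * q = q * L' := Nat.mul_comm _ _
          _ < q * L' + (r + (m + 1)) := by omega
          _ = q * L' + r + (m + 1) := by omega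
          _ ≤ L' * W := hle
      exact Nat.lt_of_mul_lt_mul_left h2
    rw [pvLoopA]
    have hpos : ((m + 1 : Nat) : Int) > 0 := by positivity
    rw [if_pos hpos]
    have hw := natForm_getD L' q r r hr
    simp only [lt_irrefl, if_false, add_zero] at hw
    simp only [hw]
    have hqWi : (q : Int) < (W : Int) := by exact_mod_cast hqW
    rw [if_pos hqWi]
    have hi : ((r : Int)).toNat = r := Int.toNat_natCast r
    have hm : ((m + 1 : Nat) : Int) - 1 = (m : Int) := by push_cast; ring
    have hmod : PySem.Int.mod ((r : Int) + 1) (L' : Int) = (((r + 1) % L' : Nat) : Int) := by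
      rw [show ((r : Int) + 1) = ((r + 1 : Nat) : Int) by push_cast; ring,
        PySem.Int.mod_natCast]
    rw [hi, hm, hmod, natForm_set L' q r hr]
    by_cases hcase : r + 1 < L'
    · rw [Nat.mod_eq_of_lt hcase]
      have := ih q (r + 1) hcase
        (by rw [show q * L' + (r + 1) + m = q * L' + r + (m + 1) by ring]; exact hle)
      rw [this, show q * L' + (r + 1) + m = q * L' + r + (m + 1) by ring]
    · have hrl : r + 1 = L' := by omega
      rw [hrl, Nat.mod_self, natForm_full]
      have := ih (q + 1) 0 hL'
        (by rw [show (q + 1) * L' + 0 + m = q * L' + (r + 1) + m by rw [hrl]; ring,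
          show q * L' + (r + 1) + m = q * L' + r + (m + 1) by ring]; exact hle)
      rw [this, show (q + 1) * L' + 0 + m = q * L' + r + (m + 1) by rw [← hrl]; ring]

-- ===== VERDICT (by name: the statement is the Claim_ definition above) =====
theorem distribute_nodes_across_layers_spec : Claim_equal_distribute_nodes_across_layers := by
  intro N L mw _ hpre
  unfold Spec_distribute_nodes_across_layers
  unfold distribute_nodes_across_layers distribute_nodes_across_layers_alt
  by_cases hL : L ≤ 0
  · simp [hL]
  · rw [if_neg hL, if_neg hL]
    dsimp only
    have hL0 : 0 < L := by omega
    have hLc : L = (L.toNat : Int) := (Int.toNat_of_nonneg (by omega)).symm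
    have hL' : 0 < L.toNat := by omega
    by_cases hN : N ≤ 0
    · have ht : N.toNat = 0 := Int.toNat_of_nonpos hN
      rw [ht, pvLoopA, if_neg (by omega : ¬ N > 0)]
      have hmax : max N 0 = ((0 : Nat) : Int) := by simp only [Nat.cast_zero]; omega
      rw [hmax, hLc, PySem.Int.floordiv_natCast, PySem.Int.mod_natCast,
        Nat.zero_div, Nat.zero_mod, pyRange_map_natForm]
      simp only [Int.toNat_natCast]
      rw [replicate_eq_natForm]
    · have hN0 : 0 < N := by omega
      have hNc : N = (N.toNat : Int) := (Int.toNat_of_nonneg (by omega)).symm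
      have hmw0 : 0 < mw := by
        rcases hpre with h | h | h
        · omega
        · omega
        · by_contra hc
          have : L * mw ≤ 0 := mul_nonpos_of_nonneg_of_nonpos (by omega) (by omega)
          omega
      have hmwc : mw = (mw.toNat : Int) := (Int.toNat_of_nonneg (by omega)).symm
      have hbound : N.toNat ≤ L.toNat * mw.toNat := by
        have h : N ≤ L * mw := by rcases hpre with h | h | h <;> [omega; omega; exact h]
        rw [hNc, hLc, hmwc] at h
        exact_mod_cast h
      have hmain := pvLoopA_eq mw.toNat L.toNat hL' N.toNat 0 0 hL'
        (by simpa using hbound)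
      simp only [Nat.zero_mul, Nat.zero_add, Nat.cast_zero] at hmain
      rw [hNc, hLc, hmwc]
      simp only [Int.toNat_natCast]
      rw [replicate_eq_natForm, hmain,
        max_eq_left (by positivity : (0 : Int) ≤ (N.toNat : Int)),
        PySem.Int.floordiv_natCast, PySem.Int.mod_natCast, pyRange_map_natForm]
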